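-- pv_equiv track=rewrite | github.com/BillsGitHubAcct/python-challenge | PyBoss/savemain.py | ssn_hide_5_char
-- ===== SOURCE A (Python) =====
-- def ssn_hide_5_char(string_var):
--     i = 0
--     new_string = ""
--     for char in string_var:
--         if char != "-" and i <= 5:
--             char = "*"
--         i += 1
--         new_string += char
--     return (new_string)
-- ===== SOURCE B (Python) =====
-- def ssn_hide_5_char(string_var):
--     # Only positions 0..5 can be masked: transform the 6-char prefix, keep the tail verbatim.
--     prefix = string_var[:6]
--     suffix = string_var[6:]
--     return ''.join('*' if c != '-' else c for c in prefix) + suffix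
-- ===== Notes on version B (the rewrite author's own statement) =====
-- stated objective: faster
-- what changed: Replaces the index-counting per-character loop with string concatenation over the whole input by a split into a 6-char masked prefix plus the untouched suffix, so the tail is never re-traversed character by character.
import Mathlib
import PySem

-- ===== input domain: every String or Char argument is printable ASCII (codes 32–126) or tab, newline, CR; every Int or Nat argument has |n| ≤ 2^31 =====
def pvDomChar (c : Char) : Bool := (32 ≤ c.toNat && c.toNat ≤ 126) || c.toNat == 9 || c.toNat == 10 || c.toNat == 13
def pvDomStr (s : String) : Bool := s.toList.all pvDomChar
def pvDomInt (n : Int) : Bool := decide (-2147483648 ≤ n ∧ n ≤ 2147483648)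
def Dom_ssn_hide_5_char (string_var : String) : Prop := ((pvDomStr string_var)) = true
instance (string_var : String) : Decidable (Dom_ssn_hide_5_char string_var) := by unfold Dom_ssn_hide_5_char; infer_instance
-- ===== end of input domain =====

-- ===== PORT A =====
-- A: index-guarded loop over every character, appending to an accumulator.
def ssn_hide_5_char (string_var : String) : String :=
  let r := string_var.toList.foldl
    (fun (st : Int × List Char) char =>
      let char := if char ≠ '-' ∧ st.1 ≤ 5 then '*' else char
      (st.1 + 1, st.2 ++ [char]))
    (0, [])
  String.mk r.2

-- ===== PORT B =====
-- B: mask the 6-char prefix, keep the suffix verbatim (simpler decomposition).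
def ssn_hide_5_char_alt (string_var : String) : String :=
  let pre := string_var.toList.take 6
  let suf := string_var.toList.drop 6
  String.mk ((pre.map (fun c => if c ≠ '-' then '*' else c)) ++ suf)

-- ===== PRECONDITION & SPEC =====
def Spec_ssn_hide_5_char (string_var : String) (out : String) : Prop := out = ssn_hide_5_char_alt string_var
instance (string_var : String) (out : String) : Decidable (Spec_ssn_hide_5_char string_var out) := by unfold Spec_ssn_hide_5_char; infer_instance

-- ===== CLAIM (what is proved, stated in full; the proofs are below) =====
def Claim_equal_ssn_hide_5_char : Prop := ∀ (string_var : String), Dom_ssn_hide_5_char string_var → Spec_ssn_hide_5_char string_var (ssn_hide_5_char string_var)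

-- ===== LEMMAS AND PROOFS =====

-- ===== VERDICT (by name: the statement is the Claim_ definition above) =====
def pvMask (c : Char) : Char := if c ≠ '-' then '*' else c

theorem pvFoldA (l : List Char) (k : Nat) (acc : List Char) :
    (l.foldl (fun (st : Int × List Char) char =>
      let char := if char ≠ '-' ∧ st.1 ≤ 5 then '*' else char
      (st.1 + 1, st.2 ++ [char])) ((k : Int), acc)).2
    = acc ++ (l.take (6 - k)).map pvMask ++ l.drop (6 - k) := by
  induction l generalizing k acc with
  | nil => simp
  | cons c t ih =>
    simp only [List.foldl]
    have h := ih (k + 1) (acc ++ [if c ≠ '-' ∧ (k : Int) ≤ 5 then '*' else c])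
    by_cases hk : k ≤ 5
    · have h6 : 6 - k = (5 - k) + 1 := by omega
      have h7 : 6 - (k + 1) = 5 - k := by omega
      have hki : (k : Int) ≤ 5 := by exact_mod_cast hk
      rw [h6]
      simp only [List.take_succ_cons, List.drop_succ_cons, List.map_cons]
      push_cast at h ⊢
      rw [h]
      simp [pvMask, hki, h7]
    · have h6 : 6 - k = 0 := by omega
      have hki : ¬ ((k : Int) ≤ 5) := by exact_mod_cast hk
      rw [h6]
      simp only [List.take_zero, List.map_nil, List.drop_zero]
      push_cast at h ⊢
      have h5 : 5 - k = 0 := by omega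
      rw [h]
      simp [hki, h5]

theorem ssn_hide_5_char_spec : Claim_equal_ssn_hide_5_char := by
  intro s _
  unfold Spec_ssn_hide_5_char ssn_hide_5_char ssn_hide_5_char_alt
  have := pvFoldA s.toList 0 []
  simp only [Nat.cast_zero] at this
  simp only [this]
  have hm : pvMask = (fun c => if c = '-' then c else '*') := by
    funext c; simp [pvMask, ite_not]
  simp [hm]
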